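-- pv_equiv track=rewrite | github.com/Thomas-van-der-Molen/codingPractice | minAbsDifServerLoads.py | minAbsDif
-- ===== SOURCE A (Python) =====
-- def minAbsDif(input):
--   list1 = list()
--   list2 = list()
--   for item in input:
--
--     if sum(list1) + sum(list2) <= item:
--         list1.extend(list2)
--         list2.clear()
--         list2.append(item)
--     elif sum(list1) > sum(list2):
--       list2.append(item)
--     else:
--       list1.append(item)
--
--   return abs(sum(list1) - sum(list2))
-- ===== SOURCE B (Python) =====
-- def minAbsDif(input):
--   # Invariant of the original greedy: the two piles always sum to the running
--   # prefix sum, so a "reset" happens exactly when prefix_sum <= item.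
--   # Pass 1: locate the last reset, keeping the start state and the suffix
--   # after it. Pass 2: plain balancing of that suffix.
--   s1, s2 = 0, 0
--   pref = 0
--   tail = []
--   for x in input:
--     if pref <= x:
--       s1, s2 = pref, x
--       tail = []
--     else:
--       tail.append(x)
--     pref += x
--   for x in tail:
--     if s1 > s2:
--       s2 += x
--     else:
--       s1 += x
--   return abs(s1 - s2)
-- ===== Notes on version B (the rewrite author's own statement) =====
-- stated objective: faster
-- what changed: B uses the invariant that the two piles always sum to the running prefix sum, so a reset happens exactly when prefix_sum <= item: pass 1 finds the last reset (start state + remaining suffix), pass 2 balances that suffix; no lists are re-summed.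
import Mathlib
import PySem

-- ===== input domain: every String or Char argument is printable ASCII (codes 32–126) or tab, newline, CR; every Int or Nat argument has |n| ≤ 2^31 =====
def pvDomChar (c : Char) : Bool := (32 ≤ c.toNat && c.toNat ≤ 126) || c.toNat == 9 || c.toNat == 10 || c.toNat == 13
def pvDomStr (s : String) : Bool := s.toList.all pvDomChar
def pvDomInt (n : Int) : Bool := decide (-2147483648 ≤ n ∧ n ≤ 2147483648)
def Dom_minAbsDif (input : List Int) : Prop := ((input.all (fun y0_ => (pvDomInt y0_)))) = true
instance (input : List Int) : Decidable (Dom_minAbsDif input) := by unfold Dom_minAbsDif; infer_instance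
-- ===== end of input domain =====

-- B replaces A's single three-branch loop over re-summed lists by two staged passes
-- (locate the last "reset", then balance the remaining suffix): O(n) instead of O(n^2).

-- ===== PORT A =====
-- the loop carries the two lists, re-summing them each iteration exactly as A does
def minAbsDifGo : List Int → List Int → List Int → Int
  | [], list1, list2 => |list1.sum - list2.sum|
  | item :: rest, list1, list2 =>
    if list1.sum + list2.sum ≤ item then
      minAbsDifGo rest (list1 ++ list2) [item]
    else if list1.sum > list2.sum then
      minAbsDifGo rest list1 (list2 ++ [item])
    else
      minAbsDifGo rest (list1 ++ [item]) list2

def minAbsDif (input : List Int) : Int := minAbsDifGo input [] []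

-- ===== PORT B =====
-- pass 1: state (s1, s2, pref, tail)
def altPass1 (st : Int × Int × Int × List Int) (x : Int) : Int × Int × Int × List Int :=
  if st.2.2.1 ≤ x then (st.2.2.1, x, st.2.2.1 + x, [])
  else (st.1, st.2.1, st.2.2.1 + x, st.2.2.2 ++ [x])

-- pass 2: balancing
def altBal (s : Int × Int) (x : Int) : Int × Int :=
  if s.1 > s.2 then (s.1, s.2 + x) else (s.1 + x, s.2)

def minAbsDif_alt (input : List Int) : Int :=
  let p := input.foldl altPass1 (0, 0, 0, [])
  let s := p.2.2.2.foldl altBal (p.1, p.2.1)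
  |s.1 - s.2|

-- ===== PRECONDITION & SPEC =====
def Spec_minAbsDif (input : List Int) (out : Int) : Prop := out = minAbsDif_alt input
instance (input : List Int) (out : Int) : Decidable (Spec_minAbsDif input out) := by unfold Spec_minAbsDif; infer_instance

-- ===== CLAIM (what is proved, stated in full; the proofs are below) =====
def Claim_equal_minAbsDif : Prop := ∀ (input : List Int), Dom_minAbsDif input → Spec_minAbsDif input (minAbsDif input)

-- ===== LEMMAS AND PROOFS =====

-- A's loop as a fold over the two sums only (proof-side characterisation)
def stepA (s : Int × Int) (x : Int) : Int × Int :=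
  if s.1 + s.2 ≤ x then (s.1 + s.2, x)
  else if s.1 > s.2 then (s.1, s.2 + x)
  else (s.1 + x, s.2)

theorem minAbsDifGo_eq_foldl (rest list1 list2 : List Int) :
    minAbsDifGo rest list1 list2 =
      |(rest.foldl stepA (list1.sum, list2.sum)).1 - (rest.foldl stepA (list1.sum, list2.sum)).2| := by
  induction rest generalizing list1 list2 with
  | nil => simp [minAbsDifGo]
  | cons item rest ih =>
    simp only [minAbsDifGo, List.foldl_cons, stepA]
    split_ifs with h1 h2 <;> simp [ih, List.sum_append]

theorem sum_foldl_stepA (l : List Int) (a b : Int) :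
    (l.foldl stepA (a, b)).1 + (l.foldl stepA (a, b)).2 = a + b + l.sum := by
  induction l generalizing a b with
  | nil => simp
  | cons x l ih =>
    simp only [List.foldl_cons, List.sum_cons, stepA]
    split_ifs <;> simp [ih] <;> ring

theorem pref_foldl_altPass1 (l : List Int) (st : Int × Int × Int × List Int) :
    (l.foldl altPass1 st).2.2.1 = st.2.2.1 + l.sum := by
  induction l generalizing st with
  | nil => simp
  | cons x l ih =>
    simp only [List.foldl_cons, List.sum_cons, altPass1]
    split_ifs <;> simp [ih] <;> ring

theorem staged_eq_stepA (l : List Int) :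
    ((l.foldl altPass1 (0, 0, 0, [])).2.2.2).foldl altBal
        ((l.foldl altPass1 (0, 0, 0, [])).1, (l.foldl altPass1 (0, 0, 0, [])).2.1)
      = l.foldl stepA (0, 0) := by
  induction l using List.reverseRecOn with
  | nil => simp
  | append_singleton l x ih =>
    simp only [List.foldl_append, List.foldl_cons, List.foldl_nil] at *
    have hpref : (l.foldl altPass1 (0, 0, 0, [])).2.2.1 = l.sum := by
      simpa using pref_foldl_altPass1 l (0, 0, 0, [])
    have hsum : (l.foldl stepA (0, 0)).1 + (l.foldl stepA (0, 0)).2 = l.sum := by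
      simpa using sum_foldl_stepA l 0 0
    by_cases h : l.sum ≤ x
    · simp [altPass1, hpref, h, stepA, hsum]
    · simp [altPass1, hpref, h, stepA, hsum, List.foldl_append, ih, altBal]

-- ===== VERDICT (by name: the statement is the Claim_ definition above) =====
theorem minAbsDif_spec : Claim_equal_minAbsDif := by
  intro input _
  unfold Spec_minAbsDif
  simp only [minAbsDif, minAbsDif_alt]
  rw [staged_eq_stepA, minAbsDifGo_eq_foldl]
  simp
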